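-- pv_equiv track=rewrite | github.com/tensorlayer/TensorLayer | tensorlayer/data/dataset/imdb.py | _preprocess_imdb
-- ===== SOURCE A (Python) =====
-- def _preprocess_imdb(X, index_from, labels, maxlen, nb_words, oov_char, skip_top, start_char):
--     if start_char is not None:
--         X = [[start_char] + [w + index_from for w in x] for x in X]
--     elif index_from:
--         X = [[w + index_from for w in x] for x in X]
--     if maxlen:
--         new_X = []
--         new_labels = []
--         for x, y in zip(X, labels):
--             if len(x) < maxlen:
--                 new_X.append(x)
--                 new_labels.append(y)
--         X = new_X
--         labels = new_labels
--     if not X: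
--         raise Exception(
--             'After filtering for sequences shorter than maxlen=' + str(maxlen) + ', no sequence was kept. '
--                                                                                  'Increase maxlen.'
--         )
--     if not nb_words:
--         nb_words = max([max(x) for x in X])
--     # by convention, use 2 as OOV word
--     # reserve 'index_from' (=3 by default) characters: 0 (padding), 1 (start), 2 (OOV)
--     if oov_char is not None:
--         X = [[oov_char if (w >= nb_words or w < skip_top) else w for w in x] for x in X]
--     else:
--         nX = []
--         for x in X:
--             nx = []
--             for w in x:
--                 if (w >= nb_words or w < skip_top):
--                     nx.append(w)
--             nX.append(nx)
--         X = nX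
--     return X, labels
-- ===== SOURCE B (Python) =====
-- def _preprocess_imdb(X, index_from, labels, maxlen, nb_words, oov_char, skip_top, start_char):
--     # One fused pass: offset each sequence, filter by length against its label,
--     # and track the running max (needed only when nb_words is falsy) as we keep it.
--     kept = []
--     kept_labels = []
--     best = None
--     li = 0
--     for x in X:
--         if start_char is not None:
--             xe = [start_char] + [w + index_from for w in x]
--         elif index_from:
--             xe = [w + index_from for w in x]
--         else:
--             xe = x
--         if maxlen:
--             if li < len(labels) and len(xe) < maxlen:
--                 kept.append(xe)
--                 kept_labels.append(labels[li])
--                 if not nb_words: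
--                     best = max(xe) if best is None else max(best, max(xe))
--             li += 1
--         else:
--             kept.append(xe)
--             if not nb_words:
--                 best = max(xe) if best is None else max(best, max(xe))
--     if not kept:
--         raise Exception(
--             'After filtering for sequences shorter than maxlen=' + str(maxlen) + ', no sequence was kept. '
--                                                                                  'Increase maxlen.'
--         )
--     nb = nb_words if nb_words else best
--     if oov_char is not None:
--         out = [[oov_char if (w >= nb or w < skip_top) else w for w in xe] for xe in kept]
--     else:
--         out = [[w for w in xe if (w >= nb or w < skip_top)] for xe in kept]
--     return out, (kept_labels if maxlen else labels)
-- ===== Notes on version B (the rewrite author's own statement) =====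
-- stated objective: alternative
-- what changed: Fuses A's four sequential whole-list passes (offset comprehension, zip length-filter loop, max-of-maxes scan, OOV pass) into one loop over X that offsets each sequence, filters it against its label, and tracks the running max as it keeps it, with only the OOV replacement as a final pass.
-- outside the precondition, e.g. on _preprocess_imdb([[1]], 0, [1], 1, None, 0, 0, None): A raises Exception, B raises Exception; on _preprocess_imdb([[], [1]], 0, [1, 2], None, None, 0, 0, None): A raises ValueError, B raises ValueError
import Mathlib
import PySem

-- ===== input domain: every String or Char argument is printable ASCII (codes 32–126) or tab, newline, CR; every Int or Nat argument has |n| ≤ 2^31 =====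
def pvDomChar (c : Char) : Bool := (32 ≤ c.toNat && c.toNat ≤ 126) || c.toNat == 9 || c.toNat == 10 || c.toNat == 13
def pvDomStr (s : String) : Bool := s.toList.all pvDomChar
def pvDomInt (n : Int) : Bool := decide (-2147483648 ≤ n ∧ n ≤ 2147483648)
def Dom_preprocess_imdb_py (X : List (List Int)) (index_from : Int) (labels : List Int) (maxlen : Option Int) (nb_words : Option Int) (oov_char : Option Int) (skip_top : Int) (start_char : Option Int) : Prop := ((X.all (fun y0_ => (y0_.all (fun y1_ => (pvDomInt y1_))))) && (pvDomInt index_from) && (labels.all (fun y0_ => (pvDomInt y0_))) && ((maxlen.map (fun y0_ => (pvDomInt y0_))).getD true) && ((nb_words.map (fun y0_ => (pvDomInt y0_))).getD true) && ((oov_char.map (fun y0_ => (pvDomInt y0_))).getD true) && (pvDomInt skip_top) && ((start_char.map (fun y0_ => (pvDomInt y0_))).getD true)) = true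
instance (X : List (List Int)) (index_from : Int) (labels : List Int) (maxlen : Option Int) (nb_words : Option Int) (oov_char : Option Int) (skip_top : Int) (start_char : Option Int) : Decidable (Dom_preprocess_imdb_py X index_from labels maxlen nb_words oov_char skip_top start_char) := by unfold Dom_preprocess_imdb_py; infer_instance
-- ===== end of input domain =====

-- B fuses A's four sequential list passes (offset, length-filter, max-scan, OOV pass) into one
-- loop over X that offsets, filters and tracks the running max at once (objective: alternative
-- single-pass decomposition; return value only — neither version mutates its arguments).

-- ===== PORT A =====
-- literal transliteration of _preprocess_imdb; where Python raises (Exception on empty result,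
-- ValueError from max([])) the port returns a junk value — those inputs are excluded by Pre_.
def preprocess_imdb_py (X : List (List Int)) (index_from : Int) (labels : List Int) (maxlen : Option Int) (nb_words : Option Int) (oov_char : Option Int) (skip_top : Int) (start_char : Option Int) : List (List Int) × List Int :=
  let X1 : List (List Int) :=
    match start_char with
    | some s => X.map (fun x => s :: x.map (fun w => w + index_from))
    | none => if index_from ≠ 0 then X.map (fun x => x.map (fun w => w + index_from)) else X
  let p : List (List Int) × List Int :=
    match maxlen with
    | some m =>
      if m ≠ 0 then
        (X1.zip labels).foldl
          (fun acc xy => if (xy.1.length : Int) < m then (acc.1 ++ [xy.1], acc.2 ++ [xy.2]) else acc)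
          ([], [])
      else (X1, labels)
    | none => (X1, labels)
  if p.1 = [] then ([], [])  -- Python: raise Exception (excluded by Pre_)
  else
    let nbw : Int :=
      match nb_words with
      | some n =>
        if n ≠ 0 then n
        else (PySem.List.max? (p.1.map (fun x => (PySem.List.max? x (fun y => y)).getD 0)) (fun y => y)).getD 0
      | none => (PySem.List.max? (p.1.map (fun x => (PySem.List.max? x (fun y => y)).getD 0)) (fun y => y)).getD 0
    match oov_char with
    | some c => (p.1.map (fun x => x.map (fun w => if w ≥ nbw ∨ w < skip_top then c else w)), p.2)
    | none => (p.1.map (fun x => x.foldl (fun nx w => if w ≥ nbw ∨ w < skip_top then nx ++ [w] else nx) []), p.2)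

-- ===== PORT B =====
-- per-sequence offset (the branch of Source B's loop body)
def pvOff (start_char : Option Int) (index_from : Int) (x : List Int) : List Int :=
  match start_char with
  | some s => s :: x.map (fun w => w + index_from)
  | none => if index_from ≠ 0 then x.map (fun w => w + index_from) else x

-- 'best = max(xe) if best is None else max(best, max(xe))'
def pvCombine (m : Int) (b : Option Int) : Option Int :=
  match b with
  | none => some m
  | some r => some (max r m)

-- the fused loop of Source B: offsets, filters against the remaining labels, tracks the running max
def pvLoop (index_from : Int) (start_char : Option Int) (mT : Option Int) (nbF : Bool) :
    List (List Int) → List Int → List (List Int) × List Int × Option Int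
  | [], _ => ([], [], none)
  | x :: xs, labs =>
    let xe := pvOff start_char index_from x
    match mT with
    | some m =>
      let r := pvLoop index_from start_char (some m) nbF xs labs.tail
      match labs with
      | [] => r
      | lab :: _ =>
        if (xe.length : Int) < m then
          (xe :: r.1, lab :: r.2.1,
            if nbF then pvCombine ((PySem.List.max? xe (fun y => y)).getD 0) r.2.2 else r.2.2)
        else r
    | none =>
      let r := pvLoop index_from start_char none nbF xs labs
      (xe :: r.1, r.2.1,
        if nbF then pvCombine ((PySem.List.max? xe (fun y => y)).getD 0) r.2.2 else r.2.2)

def preprocess_imdb_py_alt (X : List (List Int)) (index_from : Int) (labels : List Int) (maxlen : Option Int) (nb_words : Option Int) (oov_char : Option Int) (skip_top : Int) (start_char : Option Int) : List (List Int) × List Int :=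
  let mT : Option Int := match maxlen with
    | some m => if m ≠ 0 then some m else none
    | none => none
  let nbF : Bool := match nb_words with
    | some n => n == 0
    | none => true
  let r := pvLoop index_from start_char mT nbF X labels
  if r.1 = [] then ([], [])  -- Python: raise Exception (excluded by Pre_)
  else
    let nb : Int := if nbF then (r.2.2).getD 0 else nb_words.getD 0
    let out : List (List Int) :=
      match oov_char with
      | some c => r.1.map (fun xe => xe.map (fun w => if w ≥ nb ∨ w < skip_top then c else w))
      | none => r.1.map (fun xe => xe.filter (fun w => decide (w ≥ nb ∨ w < skip_top)))
    (out, match mT with | some _ => r.2.1 | none => labels)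

-- ===== PRECONDITION & SPEC =====
-- Pre_ excludes exactly the inputs on which Python A raises: those where no sequence survives
-- the length filter (explicit Exception) and those where nb_words is falsy and some surviving
-- sequence is empty with no start_char (ValueError from max([])).
def Pre_preprocess_imdb_py (X : List (List Int)) (index_from : Int) (labels : List Int) (maxlen : Option Int) (nb_words : Option Int) (oov_char : Option Int) (skip_top : Int) (start_char : Option Int) : Prop :=
  let extra : Int := if start_char.isSome then 1 else 0
  let keptX : List (List Int) :=
    match maxlen with
    | some m =>
      if m ≠ 0 then ((X.zip labels).filter (fun q => decide ((q.1.length : Int) + extra < m))).map Prod.fst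
      else X
    | none => X
  keptX ≠ [] ∧ ((nb_words = none ∨ nb_words = some 0) → (start_char.isSome = true ∨ ∀ x ∈ keptX, x ≠ []))
instance (X : List (List Int)) (index_from : Int) (labels : List Int) (maxlen : Option Int) (nb_words : Option Int) (oov_char : Option Int) (skip_top : Int) (start_char : Option Int) : Decidable (Pre_preprocess_imdb_py X index_from labels maxlen nb_words oov_char skip_top start_char) := by unfold Pre_preprocess_imdb_py; infer_instance

def pvWitness_preprocess_imdb_py : List (List Int) × Int × List Int × Option Int × Option Int × Option Int × Int × Option Int :=
  ([[1, 2]], 3, [0], none, none, some 2, 0, some 1)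

def Spec_preprocess_imdb_py (X : List (List Int)) (index_from : Int) (labels : List Int) (maxlen : Option Int) (nb_words : Option Int) (oov_char : Option Int) (skip_top : Int) (start_char : Option Int) (out : List (List Int) × List Int) : Prop := out = preprocess_imdb_py_alt X index_from labels maxlen nb_words oov_char skip_top start_char
instance (X : List (List Int)) (index_from : Int) (labels : List Int) (maxlen : Option Int) (nb_words : Option Int) (oov_char : Option Int) (skip_top : Int) (start_char : Option Int) (out : List (List Int) × List Int) : Decidable (Spec_preprocess_imdb_py X index_from labels maxlen nb_words oov_char skip_top start_char out) := by unfold Spec_preprocess_imdb_py; infer_instance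

-- ===== CLAIM (what is proved, stated in full; the proofs are below) =====
def Claim_equal_preprocess_imdb_py : Prop := ∀ (X : List (List Int)) (index_from : Int) (labels : List Int) (maxlen : Option Int) (nb_words : Option Int) (oov_char : Option Int) (skip_top : Int) (start_char : Option Int), Dom_preprocess_imdb_py X index_from labels maxlen nb_words oov_char skip_top start_char → Pre_preprocess_imdb_py X index_from labels maxlen nb_words oov_char skip_top start_char → Spec_preprocess_imdb_py X index_from labels maxlen nb_words oov_char skip_top start_char (preprocess_imdb_py X index_from labels maxlen nb_words oov_char skip_top start_char)

-- ===== LEMMAS AND PROOFS =====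

-- the foldr that pvLoop's third component computes over the kept sequences
def pvMaxes (l : List (List Int)) : Option Int :=
  l.foldr (fun xe b => pvCombine ((PySem.List.max? xe (fun y => y)).getD 0) b) none

lemma pvLoop_none (i : Int) (sc : Option Int) (nbF : Bool) :
    ∀ (X : List (List Int)) (labs : List Int),
      pvLoop i sc none nbF X labs =
        (X.map (pvOff sc i), [], if nbF then pvMaxes (X.map (pvOff sc i)) else none) := by
  intro X
  induction X with
  | nil => intro labs; cases nbF <;> simp [pvLoop, pvMaxes]
  | cons x xs ih =>
    intro labs
    cases nbF <;> simp [pvLoop, ih, pvMaxes]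

lemma pvLoop_some (i : Int) (sc : Option Int) (nbF : Bool) (m : Int) :
    ∀ (X : List (List Int)) (labs : List Int),
      pvLoop i sc (some m) nbF X labs =
        (((X.zip labs).filter (fun q => decide (((pvOff sc i q.1).length : Int) < m))).map
            (fun q => pvOff sc i q.1),
         ((X.zip labs).filter (fun q => decide (((pvOff sc i q.1).length : Int) < m))).map Prod.snd,
         if nbF then
           pvMaxes (((X.zip labs).filter (fun q => decide (((pvOff sc i q.1).length : Int) < m))).map
             (fun q => pvOff sc i q.1))
         else none) := by
  intro X
  induction X with
  | nil => intro labs; cases nbF <;> simp [pvLoop, pvMaxes]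
  | cons x xs ih =>
    intro labs
    cases labs with
    | nil => cases nbF <;> simp [pvLoop, ih, pvMaxes]
    | cons lab ls =>
      by_cases h : ((pvOff sc i x).length : Int) < m
      · cases nbF <;> simp [pvLoop, ih, pvMaxes, h]
      · cases nbF <;> simp [pvLoop, ih, pvMaxes, h]

lemma foldl_max_out : ∀ (L : List Int) (b a : Int), max (L.foldl max b) a = L.foldl max (max a b) := by
  intro L
  induction L with
  | nil => intro b a; exact max_comm b a
  | cons c L ih =>
    intro b a
    simp only [List.foldl_cons]
    rw [ih (max b c) a, max_assoc]

lemma pvMaxes_cons (a : List Int) (l : List (List Int)) :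
    pvMaxes (a :: l) =
      some ((l.map (fun x => (PySem.List.max? x (fun y => y)).getD 0)).foldl max
        ((PySem.List.max? a (fun y => y)).getD 0)) := by
  induction l generalizing a with
  | nil => simp [pvMaxes, pvCombine]
  | cons b t ih =>
    have h1 : pvMaxes (a :: b :: t) =
        pvCombine ((PySem.List.max? a (fun y => y)).getD 0) (pvMaxes (b :: t)) := rfl
    rw [h1, ih b]
    simp only [pvCombine, List.map_cons, List.foldl_cons]
    rw [foldl_max_out]

lemma maxA_eq_pvMaxes (l : List (List Int)) :
    (PySem.List.max? (l.map (fun x => (PySem.List.max? x (fun y => y)).getD 0)) (fun y => y)).getD 0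
      = (pvMaxes l).getD 0 := by
  cases l with
  | nil => simp [pvMaxes, PySem.List.max?]
  | cons a t =>
    rw [pvMaxes_cons]
    simp only [List.map_cons]
    rw [PySem.List.max?_id_cons]

lemma offA_eq_map (X : List (List Int)) (index_from : Int) (start_char : Option Int) :
    (match start_char with
      | some s => X.map (fun x => s :: x.map (fun w => w + index_from))
      | none => if index_from ≠ 0 then X.map (fun x => x.map (fun w => w + index_from)) else X)
      = X.map (pvOff start_char index_from) := by
  cases start_char with
  | some s => simp [pvOff]
  | none =>
    by_cases h : index_from ≠ 0
    · simp [pvOff, h]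
    · simp only [if_neg h]
      rw [show pvOff none index_from = id from funext fun x => by simp [pvOff, h], List.map_id]

-- A's filter loop, as the filter it computes
lemma foldA_eq (m : Int) (l : List (List Int × Int)) :
    l.foldl (fun (acc : List (List Int) × List Int) xy =>
        if (xy.1.length : Int) < m then (acc.1 ++ [xy.1], acc.2 ++ [xy.2]) else acc) ([], [])
      = ((l.filter (fun q => decide ((q.1.length : Int) < m))).map Prod.fst,
         (l.filter (fun q => decide ((q.1.length : Int) < m))).map Prod.snd) := by
  have hstep : (fun (acc : List (List Int) × List Int) (xy : List Int × Int) =>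
      if (xy.1.length : Int) < m then (acc.1 ++ [xy.1], acc.2 ++ [xy.2]) else acc)
      = (fun acc xy =>
          (if decide ((xy.1.length : Int) < m) then acc.1 ++ [xy.1] else acc.1,
           if decide ((xy.1.length : Int) < m) then acc.2 ++ [xy.2] else acc.2)) := by
    funext acc xy
    by_cases h : (xy.1.length : Int) < m <;> simp [h]
  rw [hstep,
    PySem.List.foldl_prod_mk
      (f := fun (a : List (List Int)) (xy : List Int × Int) =>
        if decide ((xy.1.length : Int) < m) then a ++ [xy.1] else a)
      (g := fun (b : List Int) (xy : List Int × Int) =>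
        if decide ((xy.1.length : Int) < m) then b ++ [xy.2] else b)]
  rw [PySem.List.foldl_append_if (p := fun q : List Int × Int => decide ((q.1.length : Int) < m))
        (f := (Prod.fst : List Int × Int → List Int)),
      PySem.List.foldl_append_if (p := fun q : List Int × Int => decide ((q.1.length : Int) < m))
        (f := (Prod.snd : List Int × Int → Int))]
  simp

-- A's word-dropping inner loop is a filter
lemma foldDrop_eq (nbw skip_top : Int) (x : List Int) :
    x.foldl (fun nx w => if w ≥ nbw ∨ w < skip_top then nx ++ [w] else nx) []
      = x.filter (fun w => decide (w ≥ nbw ∨ w < skip_top)) := by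
  simpa using PySem.List.foldl_append_ite_eq_filter (fun w => w ≥ nbw ∨ w < skip_top) x []

theorem preprocess_imdb_py_spec : Claim_equal_preprocess_imdb_py := by
  intro X index_from labels maxlen nb_words oov_char skip_top start_char _ _
  unfold Spec_preprocess_imdb_py preprocess_imdb_py preprocess_imdb_py_alt
  -- normalise the offset pass
  rw [offA_eq_map]
  -- compute the kept sequences / labels / running max on both sides
  have hzip : ((X.map (pvOff start_char index_from)).zip labels)
      = (X.zip labels).map (Prod.map (pvOff start_char index_from) id) := List.zip_map_left
  -- case on maxlen truthiness
  rcases hm : maxlen with _ | m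
  · -- maxlen = none
    simp only [hm]
    rw [pvLoop_none]
    rcases hn : nb_words with _ | n
    · simp only [hn]
      rw [maxA_eq_pvMaxes]
      cases oov_char <;> simp [foldDrop_eq]
    · by_cases hz : n = 0
      · simp only [hn, hz]
        rw [maxA_eq_pvMaxes]
        cases oov_char <;> simp [foldDrop_eq]
      · simp only [hn, hz, if_neg hz]
        have : (n == 0) = false := by simp [hz]
        cases oov_char <;> simp [this, foldDrop_eq, hz]
  · by_cases hmz : m = 0
    · -- maxlen = some 0, falsy
      subst hmz
      simp only [if_neg (show ¬((0:Int) ≠ 0) from fun h => h rfl)]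
      rw [pvLoop_none]
      rcases hn : nb_words with _ | n
      · simp only [hn]
        rw [maxA_eq_pvMaxes]
        cases oov_char <;> simp [foldDrop_eq]
      · by_cases hz : n = 0
        · simp only [hn, hz]
          rw [maxA_eq_pvMaxes]
          cases oov_char <;> simp [foldDrop_eq]
        · simp only [hn, hz, if_neg hz]
          have : (n == 0) = false := by simp [hz]
          cases oov_char <;> simp [this, foldDrop_eq, hz]
    · -- maxlen = some m, m ≠ 0: the filter runs
      simp only [hm, if_pos hmz]
      rw [pvLoop_some, hzip, foldA_eq]
      have hfil : ((X.zip labels).map (Prod.map (pvOff start_char index_from) id)).filter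
            (fun q => decide ((q.1.length : Int) < m))
          = ((X.zip labels).filter (fun q => decide (((pvOff start_char index_from q.1).length : Int) < m))).map
              (Prod.map (pvOff start_char index_from) id) := by
        rw [List.filter_map]
        rfl
      rw [hfil]
      have hfst : (((X.zip labels).filter (fun q => decide (((pvOff start_char index_from q.1).length : Int) < m))).map
            (Prod.map (pvOff start_char index_from) id)).map Prod.fst
          = ((X.zip labels).filter (fun q => decide (((pvOff start_char index_from q.1).length : Int) < m))).map
              (fun q => pvOff start_char index_from q.1) := by
        rw [List.map_map]; rfl
      have hsnd : (((X.zip labels).filter (fun q => decide (((pvOff start_char index_from q.1).length : Int) < m))).map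
            (Prod.map (pvOff start_char index_from) id)).map Prod.snd
          = ((X.zip labels).filter (fun q => decide (((pvOff start_char index_from q.1).length : Int) < m))).map
              Prod.snd := by
        rw [List.map_map]; rfl
      rw [hfst, hsnd]
      rcases hn : nb_words with _ | n
      · simp only [hn]
        rw [maxA_eq_pvMaxes]
        cases oov_char <;> simp [foldDrop_eq]
      · by_cases hz : n = 0
        · simp only [hn, hz]
          rw [maxA_eq_pvMaxes]
          cases oov_char <;> simp [foldDrop_eq]
        · simp only [hn, hz, if_neg hz]
          have : (n == 0) = false := by simp [hz]
          cases oov_char <;> simp [this, foldDrop_eq, hz]
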